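-- pv_equiv track=rewrite | github.com/AdirtKa/CryptographyLabs | SPN/spn_gpt.py | p_box_permutation
-- ===== SOURCE A (Python) =====
-- def p_box_permutation(bits: int, invert: bool = False) -> int:
--     """
--     Применение P-блока или обратного P-блока к блоку данных.
--
--     :param bits: Целое число, представляющее 16-битный блок данных.
--     :param invert: Если True, используется обратная перестановка.
--     :return: Преобразованный блок (int).
--     """
--     p_block: list[int] = [
--         1, 5, 9, 13,
--         2, 6, 10, 14,
--         3, 7, 11, 15,
--         4, 8, 12, 16
--     ]
--     p_block = [x - 1 for x in p_block]
--
--     if invert: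
--         inv_p: list[int] = [0] * len(p_block)
--         for i, p in enumerate(p_block):
--             inv_p[p] = i
--         p_block = inv_p
--
--     out: int = 0
--     for i, pos in enumerate(p_block):
--         bit: int = (bits >> pos) & 1
--         out |= bit << i
--     return out
-- ===== SOURCE B (Python) =====
-- def p_box_permutation(bits: int, invert: bool = False) -> int:
--     """The P-box is the transpose of a 4x4 bit matrix (bit 4a+b -> bit 4b+a).
--
--     A transpose is an involution, so the inverse permutation is the permutation
--     itself and `invert` does not change the result.  Apply it as the product of
--     its six disjoint transpositions, each done with an in-place xor bit swap --
--     no permutation table and no per-bit gather loop.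
--     """
--     x = bits % 0x10000
--     for i, j in ((1, 4), (2, 8), (3, 12), (6, 9), (7, 13), (11, 14)):
--         b = ((x >> i) ^ (x >> j)) & 1
--         x ^= (b << i) | (b << j)
--     return x
-- ===== Notes on version B (the rewrite author's own statement) =====
-- stated objective: alternative
-- what changed: B recognises the P-box as the transpose of a 4x4 bit matrix (an involution, so invert is irrelevant and A's inverse-table pass disappears) and applies it as six disjoint xor bit-swaps on bits % 0x10000, instead of A's table-driven 16-step gather (plus inverse-table build).
import Mathlib
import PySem

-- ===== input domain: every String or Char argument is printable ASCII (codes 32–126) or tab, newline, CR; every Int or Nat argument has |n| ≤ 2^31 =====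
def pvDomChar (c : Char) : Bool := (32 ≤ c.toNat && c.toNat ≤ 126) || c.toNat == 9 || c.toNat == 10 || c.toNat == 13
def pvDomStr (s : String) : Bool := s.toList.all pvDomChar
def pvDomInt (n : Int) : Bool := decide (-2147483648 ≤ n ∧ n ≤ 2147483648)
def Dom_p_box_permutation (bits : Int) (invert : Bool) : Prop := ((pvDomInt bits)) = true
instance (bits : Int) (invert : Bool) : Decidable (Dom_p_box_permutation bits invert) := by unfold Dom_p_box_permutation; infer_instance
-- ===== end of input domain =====

-- B applies the P-box as the 4x4 bit-matrix transpose it is: an involution (so invert is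
-- irrelevant and A's inverse-table pass disappears), done as six disjoint xor bit-swaps
-- instead of A's table-driven per-bit gather (objective: alternative).


-- ===== PORT A =====
def p_box_permutation (bits : Int) (invert : Bool) : Int :=
  let p_block : List Int := [1, 5, 9, 13, 2, 6, 10, 14, 3, 7, 11, 15, 4, 8, 12, 16]
  let p_block : List Int := p_block.map (fun x => x - 1)
  let p_block : List Int :=
    if invert then
      -- inv_p = [0]*len(p_block); for i, p in enumerate(p_block): inv_p[p] = i
      -- (every p here is a literal in 0..15, so List.set p.toNat is exact for inv_p[p] = i)
      (PySem.List.enumerate p_block).foldl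
        (fun inv_p ip => inv_p.set ip.2.toNat ip.1)
        (List.replicate p_block.length 0)
    else p_block
  -- for i, pos in enumerate(p_block): bit = (bits >> pos) & 1; out |= bit << i
  (PySem.List.enumerate p_block).foldl
    (fun out ipos => PySem.Int.bor out ((PySem.Int.band (bits >>> ipos.2.toNat) 1) <<< ipos.1.toNat)) 0

-- ===== PORT B =====
def p_box_permutation_alt (bits : Int) (invert : Bool) : Int :=
  let x := PySem.Int.mod bits 65536
  [(1, 4), (2, 8), (3, 12), (6, 9), (7, 13), (11, 14)].foldl
    (fun x (ij : Nat × Nat) =>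
      let b := PySem.Int.band (PySem.Int.bxor (x >>> ij.1) (x >>> ij.2)) 1
      PySem.Int.bxor x (PySem.Int.bor (b <<< ij.1) (b <<< ij.2))) x

-- ===== PRECONDITION & SPEC =====
def Spec_p_box_permutation (bits : Int) (invert : Bool) (out : Int) : Prop := out = p_box_permutation_alt bits invert
instance (bits : Int) (invert : Bool) (out : Int) : Decidable (Spec_p_box_permutation bits invert out) := by unfold Spec_p_box_permutation; infer_instance

-- ===== CLAIM (what is proved, stated in full; the proofs are below) =====
def Claim_equal_p_box_permutation : Prop := ∀ (bits : Int) (invert : Bool), Dom_p_box_permutation bits invert → Spec_p_box_permutation bits invert (p_box_permutation bits invert)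

-- ===== LEMMAS AND PROOFS =====

-- bits of a (y &&& 1) value: only bit 0 can be set
theorem tb1 (y t : Nat) (h : 1 ≤ t) : (y &&& 1).testBit t = false := by
  rw [Nat.testBit_and]
  have : Nat.testBit 1 t = false := Nat.testBit_eq_false_of_lt (Nat.one_lt_two_pow_iff.mpr (by omega))
  simp [this]

theorem tb0 (y : Nat) : (y &&& 1).testBit 0 = y.testBit 0 := by
  have : Nat.testBit 1 0 = true := rfl
  simp [this]

-- one xor bit-swap on a Nat, exactly B's loop body
def swapN (x : Nat) (i j : Nat) : Nat :=
  x ^^^ (((((x >>> i) ^^^ (x >>> j)) &&& 1) <<< i) ||| ((((x >>> i) ^^^ (x >>> j)) &&& 1) <<< j))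

theorem testBit_swapN (x i j k : Nat) (hij : i < j) :
    (swapN x i j).testBit k =
      if k = i then x.testBit j else if k = j then x.testBit i else x.testBit k := by
  have hB0 : ((x >>> i ^^^ x >>> j) &&& 1).testBit 0 = (x.testBit i ^^ x.testBit j) := by
    rw [tb0, Nat.testBit_xor, Nat.testBit_shiftRight, Nat.testBit_shiftRight,
      Nat.add_zero, Nat.add_zero]
  simp only [swapN, Nat.testBit_xor, Nat.testBit_or, Nat.testBit_shiftLeft]
  by_cases hki : k = i
  · rw [hki]
    have h2 : ¬ (j ≤ i) := by omega
    simp only [le_refl, decide_true, Nat.sub_self, hB0, h2, decide_false, Bool.false_and,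
      Bool.true_and, Bool.or_false]
    cases x.testBit i <;> cases x.testBit j <;> rfl
  · by_cases hkj : k = j
    · rw [hkj]
      have h2 : i ≤ j := by omega
      rw [tb1 _ _ (by omega)]
      simp only [le_refl, decide_true, Nat.sub_self, hB0, h2, Bool.true_and, Bool.and_false,
        Bool.false_or, if_neg (by omega : ¬ j = i)]
      cases x.testBit i <;> cases x.testBit j <;> rfl
    · rw [if_neg hki, if_neg hkj]
      by_cases h1 : i ≤ k <;> by_cases h2 : j ≤ k
      · rw [tb1 _ _ (by omega), tb1 _ _ (by omega)]; simp
      · rw [tb1 _ _ (by omega)]; simp [h2]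
      · omega
      · simp [h1, h2]

-- A's gather loop, written out on Nat
def gA (m : Nat) : Nat :=
  (((m >>> 0) &&& 1) <<< 0) ||| (((m >>> 4) &&& 1) <<< 1) ||| (((m >>> 8) &&& 1) <<< 2) ||| (((m >>> 12) &&& 1) <<< 3) |||
  (((m >>> 1) &&& 1) <<< 4) ||| (((m >>> 5) &&& 1) <<< 5) ||| (((m >>> 9) &&& 1) <<< 6) ||| (((m >>> 13) &&& 1) <<< 7) |||
  (((m >>> 2) &&& 1) <<< 8) ||| (((m >>> 6) &&& 1) <<< 9) ||| (((m >>> 10) &&& 1) <<< 10) ||| (((m >>> 14) &&& 1) <<< 11) |||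
  (((m >>> 3) &&& 1) <<< 12) ||| (((m >>> 7) &&& 1) <<< 13) ||| (((m >>> 11) &&& 1) <<< 14) ||| (((m >>> 15) &&& 1) <<< 15)

-- B's six swaps, written out on Nat
def gB (m : Nat) : Nat :=
  swapN (swapN (swapN (swapN (swapN (swapN m 1 4) 2 8) 3 12) 6 9) 7 13) 11 14

theorem termBit (m p i k : Nat) :
    ((((m >>> p) &&& 1) <<< i)).testBit k = if k = i then m.testBit p else false := by
  rw [Nat.testBit_shiftLeft]
  by_cases hki : k = i
  · rw [hki]
    simp only [le_refl, decide_true, Nat.sub_self, tb0, Nat.testBit_shiftRight,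
      Nat.add_zero, Bool.true_and, if_true]
  · rw [if_neg hki]
    by_cases h1 : i ≤ k
    · rw [tb1 _ _ (by omega)]; simp
    · simp [h1]

theorem term_lt (y i : Nat) (hi : i ≤ 15) : (y &&& 1) <<< i < 65536 := by
  rw [Nat.shiftLeft_eq]
  have h1 : y &&& 1 ≤ 1 := Nat.and_le_right
  have h2 : (2:Nat) ^ i ≤ 2 ^ 15 := Nat.pow_le_pow_right (by norm_num) hi
  calc (y &&& 1) * 2 ^ i ≤ 1 * 2 ^ 15 := Nat.mul_le_mul h1 h2
    _ < 65536 := by norm_num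

theorem gA_lt (m : Nat) : gA m < 65536 := by
  have hor : ∀ a b : Nat, a < 65536 → b < 65536 → a ||| b < 65536 := fun a b ha hb =>
    Nat.or_lt_two_pow (n := 16) ha hb
  simp only [gA]
  repeat' apply hor
  all_goals exact term_lt _ _ (by norm_num)

theorem high_bit (m k : Nat) (hm : m < 65536) (hk : 16 ≤ k) : m.testBit k = false :=
  Nat.testBit_eq_false_of_lt (lt_of_lt_of_le hm (le_trans (by norm_num) (Nat.pow_le_pow_right (by norm_num) hk)))

-- the heart: A's gather equals B's swap cascade, bit by bit
set_option maxHeartbeats 2000000 in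
theorem gAB (m : Nat) (hm : m < 65536) : gA m = gB m := by
  apply Nat.eq_of_testBit_eq
  intro k
  by_cases hk : k < 16
  · simp only [gA, gB, Nat.testBit_or, termBit,
      testBit_swapN _ 1 4 _ (by norm_num), testBit_swapN _ 2 8 _ (by norm_num),
      testBit_swapN _ 3 12 _ (by norm_num), testBit_swapN _ 6 9 _ (by norm_num),
      testBit_swapN _ 7 13 _ (by norm_num), testBit_swapN _ 11 14 _ (by norm_num)]
    interval_cases k <;> norm_num
  · rw [show (gA m).testBit k = false from
      Nat.testBit_eq_false_of_lt (lt_of_lt_of_le (gA_lt m) (le_trans (by norm_num : (65536:Nat) ≤ 2 ^ 16) (Nat.pow_le_pow_right (by norm_num) (show 16 ≤ k by omega)))),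
      gB, testBit_swapN _ 11 14 _ (by norm_num), if_neg (by omega), if_neg (by omega),
      testBit_swapN _ 7 13 _ (by norm_num), if_neg (by omega), if_neg (by omega),
      testBit_swapN _ 6 9 _ (by norm_num), if_neg (by omega), if_neg (by omega),
      testBit_swapN _ 3 12 _ (by norm_num), if_neg (by omega), if_neg (by omega),
      testBit_swapN _ 2 8 _ (by norm_num), if_neg (by omega), if_neg (by omega),
      testBit_swapN _ 1 4 _ (by norm_num), if_neg (by omega), if_neg (by omega),
      high_bit m k hm (by omega)]

-- low-16 window: dividing a % 2^16 or a itself by 2^p (p ≤ 15) has the same parity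
theorem emod_div_pow (a : Int) (p : Nat) (hp : p ≤ 15) :
    (a % 65536) / (2 ^ p : Int) % 2 = a / (2 ^ p : Int) % 2 := by
  have hpow : (2:Int) ^ p * (2 * 2 ^ (15 - p)) = 65536 := by
    have : p + (1 + (15 - p)) = 16 := by omega
    calc (2:Int) ^ p * (2 * 2 ^ (15 - p)) = 2 ^ p * (2 ^ 1 * 2 ^ (15 - p)) := by norm_num
      _ = 2 ^ (p + (1 + (15 - p))) := by rw [← pow_add, ← pow_add]
      _ = 2 ^ 16 := by rw [this]
      _ = 65536 := by norm_num
  have hmod : a % 65536 = a + (2:Int) ^ p * ((2 * 2 ^ (15 - p)) * (-(a / 65536))) := by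
    rw [Int.emod_def]; rw [← hpow]; ring
  rw [hmod, Int.add_mul_ediv_left _ _ (by positivity : (2:Int) ^ p ≠ 0)]
  have : a / 2 ^ p + 2 * 2 ^ (15 - p) * -(a / 65536)
       = a / 2 ^ p + 2 * (2 ^ (15 - p) * -(a / 65536)) := by ring
  rw [this, Int.add_mul_emod_self_left]

-- each of A's terms reads a bit of bits % 2^16
theorem termA (bits : Int) (p : Nat) (hp : p ≤ 15) :
    PySem.Int.band (bits >>> p) 1
      = ((((PySem.Int.mod bits 65536).toNat >>> p) &&& 1 : Nat) : Int) := by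
  rw [PySem.Int.band_one, PySem.Int.mod_eq_emod_of_pos (by norm_num),
    PySem.Int.mod_eq_emod_of_pos (by norm_num), Int.shiftRight_eq_div_pow,
    Nat.shiftRight_eq_div_pow, Nat.and_one_is_mod]
  have hnn : (0:Int) ≤ bits % 65536 := Int.emod_nonneg bits (by norm_num)
  push_cast
  rw [Int.toNat_of_nonneg hnn]
  exact (emod_div_pow bits p hp).symm

theorem natCast_shiftRight (m i : Nat) : ((m : Int) >>> i) = ((m >>> i : Nat) : Int) := by
  simp [Int.shiftRight_eq_div_pow, Nat.shiftRight_eq_div_pow]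

theorem natCast_shiftLeft (m i : Nat) : ((m : Int) <<< i) = ((m <<< i : Nat) : Int) := by
  simp [Int.shiftLeft_eq, Nat.shiftLeft_eq]

theorem band_one_natCast (a : Nat) : PySem.Int.band (a : Int) 1 = ((a &&& 1 : Nat) : Int) := by
  have h : (1 : Int) = ((1 : Nat) : Int) := rfl
  rw [h, PySem.Int.band_natCast]

theorem zero_bor (a : Int) : PySem.Int.bor 0 a = a := by
  rw [PySem.Int.bor_comm]; exact PySem.Int.bor_zero a

-- one Int-level swap step of B's loop is the Nat-level swapN, under the cast
theorem stepInt (x i j : Nat) :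
    PySem.Int.bxor (x : Int)
      (PySem.Int.bor
        ((PySem.Int.band (PySem.Int.bxor ((x : Int) >>> i) ((x : Int) >>> j)) 1) <<< i)
        ((PySem.Int.band (PySem.Int.bxor ((x : Int) >>> i) ((x : Int) >>> j)) 1) <<< j))
      = ((swapN x i j : Nat) : Int) := by
  rw [natCast_shiftRight, natCast_shiftRight, PySem.Int.bxor_natCast, band_one_natCast,
    natCast_shiftLeft, natCast_shiftLeft, PySem.Int.bor_natCast, PySem.Int.bxor_natCast, swapN]

-- A's port reduces to gA of the low 16 bits (both invert branches: the P-box is self-inverse,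
-- so the inverse table A builds is the table itself)
theorem portA_eq (bits : Int) (invert : Bool) :
    p_box_permutation bits invert = ((gA (PySem.Int.mod bits 65536).toNat : Nat) : Int) := by
  have hmap : (([1, 5, 9, 13, 2, 6, 10, 14, 3, 7, 11, 15, 4, 8, 12, 16] : List Int).map
      (fun x => x - 1)) = [0, 4, 8, 12, 1, 5, 9, 13, 2, 6, 10, 14, 3, 7, 11, 15] := by decide
  have hinv : (PySem.List.enumerate ([0, 4, 8, 12, 1, 5, 9, 13, 2, 6, 10, 14, 3, 7, 11, 15] : List Int)).foldl
        (fun inv_p ip => inv_p.set ip.2.toNat ip.1)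
        (List.replicate ([0, 4, 8, 12, 1, 5, 9, 13, 2, 6, 10, 14, 3, 7, 11, 15] : List Int).length 0)
      = [0, 4, 8, 12, 1, 5, 9, 13, 2, 6, 10, 14, 3, 7, 11, 15] := by decide
  have henum : PySem.List.enumerate ([0, 4, 8, 12, 1, 5, 9, 13, 2, 6, 10, 14, 3, 7, 11, 15] : List Int)
      = [((0:Int),(0:Int)), (1,4), (2,8), (3,12), (4,1), (5,5), (6,9), (7,13),
         (8,2), (9,6), (10,10), (11,14), (12,3), (13,7), (14,11), (15,15)] := by decide
  have hbody : p_box_permutation bits invert =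
      (PySem.List.enumerate ([0, 4, 8, 12, 1, 5, 9, 13, 2, 6, 10, 14, 3, 7, 11, 15] : List Int)).foldl
        (fun out ipos => PySem.Int.bor out ((PySem.Int.band (bits >>> ipos.2.toNat) 1) <<< ipos.1.toNat)) 0 := by
    simp only [p_box_permutation, hmap]
    cases invert
    · simp only [Bool.false_eq_true, reduceIte]
    · simp only [reduceIte, hinv]
  rw [hbody, henum]
  simp only [List.foldl]
  simp only [show ((0:Int)).toNat = 0 from rfl, show ((1:Int)).toNat = 1 from rfl, show ((2:Int)).toNat = 2 from rfl, show ((3:Int)).toNat = 3 from rfl, show ((4:Int)).toNat = 4 from rfl, show ((5:Int)).toNat = 5 from rfl, show ((6:Int)).toNat = 6 from rfl, show ((7:Int)).toNat = 7 from rfl, show ((8:Int)).toNat = 8 from rfl, show ((9:Int)).toNat = 9 from rfl, show ((10:Int)).toNat = 10 from rfl, show ((11:Int)).toNat = 11 from rfl, show ((12:Int)).toNat = 12 from rfl, show ((13:Int)).toNat = 13 from rfl, show ((14:Int)).toNat = 14 from rfl, show ((15:Int)).toNat = 15 from rfl]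
  simp only [Int.shiftRight_natCast_right, Int.shiftLeft_natCast_right]
  rw [termA bits 0 (by norm_num), termA bits 4 (by norm_num), termA bits 8 (by norm_num),
    termA bits 12 (by norm_num), termA bits 1 (by norm_num), termA bits 5 (by norm_num),
    termA bits 9 (by norm_num), termA bits 13 (by norm_num), termA bits 2 (by norm_num),
    termA bits 6 (by norm_num), termA bits 10 (by norm_num), termA bits 14 (by norm_num),
    termA bits 3 (by norm_num), termA bits 7 (by norm_num), termA bits 11 (by norm_num),
    termA bits 15 (by norm_num)]
  simp only [natCast_shiftLeft, PySem.Int.bor_natCast, zero_bor, gA]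

-- B's port reduces to gB of the low 16 bits
theorem portB_eq (bits : Int) (invert : Bool) :
    p_box_permutation_alt bits invert = ((gB (PySem.Int.mod bits 65536).toNat : Nat) : Int) := by
  have hx : PySem.Int.mod bits 65536 = (((PySem.Int.mod bits 65536).toNat : Nat) : Int) :=
    (Int.toNat_of_nonneg (PySem.Int.mod_nonneg bits (by norm_num))).symm
  obtain ⟨m, hm⟩ : ∃ m : Nat, PySem.Int.mod bits 65536 = (m : Int) :=
    ⟨(PySem.Int.mod bits 65536).toNat, hx⟩
  unfold p_box_permutation_alt
  rw [hm]
  simp only [List.foldl]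
  simp only [stepInt, gB, Int.toNat_natCast]

-- ===== VERDICT (by name: the statement is the Claim_ definition above) =====
theorem p_box_permutation_spec : Claim_equal_p_box_permutation := by
  intro bits invert _
  unfold Spec_p_box_permutation
  rw [portA_eq, portB_eq]
  have hlt : (PySem.Int.mod bits 65536).toNat < 65536 := by
    have h1 := PySem.Int.mod_lt bits (show (0:Int) < 65536 by norm_num)
    omega
  rw [gAB _ hlt]
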